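-- pv_equiv track=rewrite | github.com/Verulean/Advent-of-Code | years/2025/days/aoc08.py | solve
-- ===== SOURCE A (Python) =====
-- from collections import defaultdict
-- from itertools import combinations
-- from math import prod
--
-- Junction = tuple[int]
--
-- class Graph(defaultdict):
--     def __init__(self):
--         super().__init__(set)
--
--     def add_junction(self, u: Junction) -> None:
--         self[u].add(u)
--
--     def connect(self, u: Junction, v: Junction) -> None:
--         if v in self[u]:
--             return
--         self[u] |= self[v]
--         for node in self[v]:
--             self[node] = self[u]
--
--     def get_circuits(self) -> list[set[Junction]]:
--         junctions = set(self.keys())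
--         circuits = []
--         while junctions:
--             circuit = self[junctions.pop()]
--             circuits.append(circuit)
--             junctions -= circuit
--         return circuits
--
--     def is_connected(self) -> bool:
--         return len(next(iter(self.values()))) == len(self)
--
-- def dist(connection: tuple[Junction, Junction]) -> int:
--     u, v = connection
--     return (u[0] - v[0]) ** 2 + (u[1] - v[1]) ** 2 + (u[2] - v[2]) ** 2
--
-- def solve(data: list[Junction]) -> tuple[int, int | None]:
--     connection_count = 1000
--     graph = Graph()
--     for p in data:
--         graph.add_junction(p)
--     connections = sorted(combinations(data, 2), key=dist)
--     for u, v in connections[:connection_count]: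
--         graph.connect(u, v)
--     ans1 = prod(sorted(map(len, graph.get_circuits()))[-3:])
--     for u, v in connections[connection_count:]:
--         graph.connect(u, v)
--         if graph.is_connected():
--             return ans1, u[0] * v[0]
--     return ans1, None
-- ===== SOURCE B (Python) =====
-- from itertools import combinations
--
--
-- def solve(data):
--     connection_count = 1000
--     # partition of the distinct points, kept as a flat list of disjoint components
--     comps = []
--     for p in data:
--         if not any(p in c for c in comps):
--             comps.append([p])
--
--     def dist2(e):
--         u, v = e
--         return (u[0] - v[0]) ** 2 + (u[1] - v[1]) ** 2 + (u[2] - v[2]) ** 2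
--
--     edges = sorted(combinations(data, 2), key=dist2)
--
--     def merge(u, v):
--         cu = next(c for c in comps if u in c)
--         cv = next(c for c in comps if v in c)
--         if cu == cv:
--             return
--         comps.remove(cu)
--         comps.remove(cv)
--         comps.append(cu + [x for x in cv if x not in cu])
--
--     for u, v in edges[:connection_count]:
--         merge(u, v)
--     ans1 = 1
--     for s in sorted(map(len, comps))[-3:]:
--         ans1 *= s
--     for u, v in edges[connection_count:]:
--         merge(u, v)
--         if len(comps) == 1:
--             return ans1, u[0] * v[0]
--     return ans1, None
-- ===== Notes on version B (the rewrite author's own statement) =====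
-- stated objective: simpler
-- what changed: Replaces the Graph class (a defaultdict mapping every node to a shared, in-place-mutated component set, with circuits extracted by a worklist loop and connectivity read off the first value's size) by a flat list of disjoint component lists: membership is found by scanning the list, a merge splices two entries into one, part-1 sizes are read off directly and connectivity is simply len(comps) == 1.
import Mathlib
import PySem

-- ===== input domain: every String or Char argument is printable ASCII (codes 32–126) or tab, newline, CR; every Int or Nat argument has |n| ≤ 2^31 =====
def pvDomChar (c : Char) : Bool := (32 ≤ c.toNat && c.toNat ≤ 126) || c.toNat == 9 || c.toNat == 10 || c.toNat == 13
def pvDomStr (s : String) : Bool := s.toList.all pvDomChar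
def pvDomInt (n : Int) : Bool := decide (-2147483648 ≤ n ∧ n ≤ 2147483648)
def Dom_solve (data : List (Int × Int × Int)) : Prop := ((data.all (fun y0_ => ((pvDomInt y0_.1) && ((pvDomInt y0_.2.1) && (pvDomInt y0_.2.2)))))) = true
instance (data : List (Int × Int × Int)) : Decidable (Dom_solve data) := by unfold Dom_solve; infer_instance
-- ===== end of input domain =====

-- B replaces A's node→shared-set Graph class by a flat list of disjoint components (simpler);
-- return values only: A mutates no argument, B mutates no argument.

abbrev PvJ := Int × Int × Int

-- ===== PORT A =====
-- itertools.combinations(data, 2), as pairs in CPython's index-lexicographic order (shared by both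
-- ports: both Python versions call the same library function)
def pvPairs (l : List PvJ) : List (PvJ × PvJ) :=
  match l with
  | [] => []
  | x :: xs => xs.map (fun y => (x, y)) ++ pvPairs xs

-- dist(connection): u, v = connection; (u[0]-v[0])**2 + (u[1]-v[1])**2 + (u[2]-v[2])**2
def pvDist (e : PvJ × PvJ) : Int :=
  (e.1.1 - e.2.1) ^ 2 + (e.1.2.1 - e.2.2.1) ^ 2 + (e.1.2.2 - e.2.2.2) ^ 2

-- Graph.add_junction: self[u].add(u)  (defaultdict: a missing key appears, mapped to set(), at the end)
def pvAddJunction (g : PySem.Dict PvJ (PySem.Set PvJ)) (u : PvJ) : PySem.Dict PvJ (PySem.Set PvJ) :=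
  g.insert u (PySem.Set.add (g.getD u PySem.Set.empty) u)

-- Graph.connect: Python's 'self[u] |= self[v]' mutates the ONE set object shared by exactly the keys
-- of u's component (the class invariant), so it is modeled by rewriting every entry whose stored set
-- equals self[u]; the following 'for node in self[v]: self[node] = self[u]' is the insert fold.
def pvConnect (g : PySem.Dict PvJ (PySem.Set PvJ)) (u v : PvJ) : PySem.Dict PvJ (PySem.Set PvJ) :=
  let su := g.getD u PySem.Set.empty
  if PySem.Set.contains su v then g
  else
    let sv := g.getD v PySem.Set.empty
    let un := PySem.Set.union su sv
    let g1 : PySem.Dict PvJ (PySem.Set PvJ) :=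
      PySem.Dict.mk (g.items.map (fun kv => if kv.2 = su then (kv.1, un) else kv))
    sv.foldl (fun h node => h.insert node un) g1

-- Graph.get_circuits: 'junctions.pop()' pops in arbitrary (hash) order; the circuits are whole
-- components regardless of that order, so the result is consumed only as a multiset of sizes
-- (sorted afterwards); we scan the keys in insertion order, skipping already-collected junctions.
def pvGetCircuits (g : PySem.Dict PvJ (PySem.Set PvJ)) : List (PySem.Set PvJ) :=
  (g.keys.foldl
    (fun (acc : List (PySem.Set PvJ) × PySem.Set PvJ) k =>
      if PySem.Set.contains acc.2 k then acc
      else (acc.1 ++ [g.getD k PySem.Set.empty], PySem.Set.update acc.2 (g.getD k PySem.Set.empty)))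
    ([], PySem.Set.empty)).1

-- Graph.is_connected: len(next(iter(self.values()))) == len(self); the [] branch (StopIteration)
-- is unreachable in solve, which only calls it when the graph is nonempty.
def pvIsConnected (g : PySem.Dict PvJ (PySem.Set PvJ)) : Bool :=
  match g.values with
  | [] => false
  | s :: _ => PySem.Set.len s == (g.size : Int)

-- the second for-loop of solve, with its early return
def pvLoopA (es : List (PvJ × PvJ)) (g : PySem.Dict PvJ (PySem.Set PvJ)) : Option Int :=
  match es with
  | [] => none
  | e :: rest =>
    let g' := pvConnect g e.1 e.2
    if pvIsConnected g' then some (e.1.1 * e.2.1) else pvLoopA rest g'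

def solve (data : List (Int × Int × Int)) : Int × Option Int :=
  let connectionCount : Int := 1000
  let graph := data.foldl pvAddJunction PySem.Dict.empty
  let connections := PySem.List.sorted (pvPairs data) pvDist
  let graph := (PySem.List.slice connections none (some connectionCount)).foldl
      (fun g e => pvConnect g e.1 e.2) graph
  -- ans1 = prod(sorted(map(len, graph.get_circuits()))[-3:])
  let ans1 := (PySem.List.slice
      (PySem.List.sorted ((pvGetCircuits graph).map PySem.Set.len) (fun x => x)) (some (-3)) none).prod
  (ans1, pvLoopA (PySem.List.slice connections (some connectionCount) none) graph)

-- ===== PORT B =====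
def pvDist2 (e : PvJ × PvJ) : Int :=
  (e.1.1 - e.2.1) ^ 2 + (e.1.2.1 - e.2.2.1) ^ 2 + (e.1.2.2 - e.2.2.2) ^ 2

-- merge(u, v): next(c for c in comps if u in c) never raises in solve (every endpoint is in some
-- component), so the none branch of find? is dead; comps.remove(c) = List.erase (first occurrence).
def pvMerge (cs : List (List PvJ)) (u v : PvJ) : List (List PvJ) :=
  let cu := (cs.find? (fun c => decide (u ∈ c))).getD []
  let cv := (cs.find? (fun c => decide (v ∈ c))).getD []
  if cu = cv then cs
  else ((cs.erase cu).erase cv) ++ [cu ++ cv.filter (fun x => decide (x ∉ cu))]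

def pvLoopB (es : List (PvJ × PvJ)) (cs : List (List PvJ)) : Option Int :=
  match es with
  | [] => none
  | e :: rest =>
    let cs' := pvMerge cs e.1 e.2
    if cs'.length = 1 then some (e.1.1 * e.2.1) else pvLoopB rest cs'

def solve_alt (data : List (Int × Int × Int)) : Int × Option Int :=
  let connectionCount : Int := 1000
  let comps := data.foldl
      (fun (cs : List (List PvJ)) p => if cs.any (fun c => decide (p ∈ c)) then cs else cs ++ [[p]]) []
  let edges := PySem.List.sorted (pvPairs data) pvDist2
  let comps := (PySem.List.slice edges none (some connectionCount)).foldl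
      (fun cs e => pvMerge cs e.1 e.2) comps
  -- ans1 = 1; for s in sorted(map(len, comps))[-3:]: ans1 *= s
  let ans1 := (PySem.List.slice
      (PySem.List.sorted (comps.map PySem.List.len) (fun x => x)) (some (-3)) none).foldl (· * ·) 1
  (ans1, pvLoopB (PySem.List.slice edges (some connectionCount) none) comps)

-- ===== PRECONDITION & SPEC =====
def Spec_solve (data : List (Int × Int × Int)) (out : Int × Option Int) : Prop := out = solve_alt data
instance (data : List (Int × Int × Int)) (out : Int × Option Int) : Decidable (Spec_solve data out) := by unfold Spec_solve; infer_instance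

-- ===== CLAIM (what is proved, stated in full; the proofs are below) =====
def Claim_equal_solve : Prop := ∀ (data : List (Int × Int × Int)), Dom_solve data → Spec_solve data (solve data)

-- ===== LEMMAS AND PROOFS =====

-- the simulation invariant: cs is a partition of the key set K of A's graph, and A's dict maps
-- every key to exactly the component (the same list) that contains it
structure PvInv (K : List PvJ) (g : PySem.Dict PvJ (PySem.Set PvJ)) (cs : List (List PvJ)) : Prop where
  keys_eq : g.keys = K
  knd : K.Nodup
  cover : ∀ k ∈ K, ∃ c ∈ cs, k ∈ c
  sub : ∀ c ∈ cs, ∀ x ∈ c, x ∈ K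
  ne : ∀ c ∈ cs, c ≠ []
  cnd : ∀ c ∈ cs, c.Nodup
  disj : cs.Pairwise (fun c d => ∀ x ∈ c, x ∉ d)
  val : ∀ k ∈ K, ∀ c ∈ cs, k ∈ c → g.getD k PySem.Set.empty = c

theorem pvPairs_mem {l : List PvJ} {e : PvJ × PvJ} (h : e ∈ pvPairs l) : e.1 ∈ l ∧ e.2 ∈ l := by
  induction l with
  | nil => simp [pvPairs] at h
  | cons x xs ih =>
    simp only [pvPairs, List.mem_append, List.mem_map] at h
    rcases h with ⟨y, hy, rfl⟩ | h
    · exact ⟨List.mem_cons_self, List.mem_cons_of_mem _ hy⟩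
    · obtain ⟨h1, h2⟩ := ih h
      exact ⟨List.mem_cons_of_mem _ h1, List.mem_cons_of_mem _ h2⟩

theorem pv_disj_unique {cs : List (List PvJ)} (hd : cs.Pairwise (fun c d => ∀ x ∈ c, x ∉ d))
    {c d : List PvJ} (hc : c ∈ cs) (hdm : d ∈ cs) {x : PvJ} (hxc : x ∈ c) (hxd : x ∈ d) : c = d := by
  induction cs with
  | nil => cases hc
  | cons c0 rest ih =>
    rw [List.pairwise_cons] at hd
    rcases List.mem_cons.mp hc with h1 | h1 <;> rcases List.mem_cons.mp hdm with h2 | h2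
    · rw [h1, h2]
    · subst h1; exact absurd hxd (hd.1 _ h2 _ hxc)
    · subst h2; exact absurd hxc (hd.1 _ h1 _ hxd)
    · exact ih hd.2 h1 h2

theorem pv_cs_nodup {cs : List (List PvJ)} (hne : ∀ c ∈ cs, c ≠ [])
    (hd : cs.Pairwise (fun c d => ∀ x ∈ c, x ∉ d)) : cs.Nodup := by
  induction cs with
  | nil => exact List.nodup_nil
  | cons c0 rest ih =>
    rw [List.pairwise_cons] at hd
    refine List.nodup_cons.mpr ⟨?_, ih (fun c hc => hne c (List.mem_cons_of_mem _ hc)) hd.2⟩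
    intro hmem
    obtain ⟨x, hx⟩ := List.exists_mem_of_ne_nil c0 (hne c0 List.mem_cons_self)
    exact hd.1 _ hmem x hx hx

theorem pvInv_getD_mem {K g cs} (inv : PvInv K g cs) {k : PvJ} (hk : k ∈ K) :
    g.getD k PySem.Set.empty ∈ cs ∧ k ∈ g.getD k PySem.Set.empty := by
  obtain ⟨c, hc, hkc⟩ := inv.cover k hk
  rw [inv.val k hk c hc hkc]
  exact ⟨hc, hkc⟩

theorem pv_find?_unique {cs : List (List PvJ)} {p : List PvJ → Bool} {c : List PvJ}
    (hc : c ∈ cs) (hp : p c = true) (hu : ∀ d ∈ cs, p d = true → d = c) :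
    cs.find? p = some c := by
  induction cs with
  | nil => cases hc
  | cons d0 rest ih =>
    by_cases h0 : p d0 = true
    · have hd0 : d0 = c := hu d0 List.mem_cons_self h0
      subst hd0
      exact List.find?_cons_of_pos h0
    · have hc' : c ∈ rest := by
        rcases List.mem_cons.mp hc with h | h
        · exact absurd (h ▸ hp) h0
        · exact h
      rw [List.find?_cons_of_neg (by simpa using h0)]
      exact ih hc' (fun d hd => hu d (List.mem_cons_of_mem _ hd))

theorem pv_getD_mk_map (S : List PvJ) (f : PvJ → PySem.Set PvJ) (k : PvJ) (d : PySem.Set PvJ) :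
    (PySem.Dict.mk (S.map (fun p => (p, f p)))).getD k d = if k ∈ S then f k else d := by
  induction S with
  | nil => simp [PySem.Dict.getD, PySem.Dict.get?]
  | cons q S ih =>
    simp only [PySem.Dict.getD, PySem.Dict.get?] at ih ⊢
    simp only [List.map_cons]
    by_cases hqk : q = k
    · subst hqk
      rw [List.find?_cons_of_pos (by simp)]
      simp
    · rw [List.find?_cons_of_neg (by simp [hqk])]
      rw [ih]
      have hiff : (k ∈ q :: S) ↔ (k ∈ S) := by simp [List.mem_cons, Ne.symm hqk]
      simp [hiff]

theorem pv_getD_remap (items : List (PvJ × PySem.Set PvJ)) (su un : PySem.Set PvJ) (k : PvJ)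
    (d : PySem.Set PvJ) (hk : k ∈ items.map Prod.fst) :
    (PySem.Dict.mk (items.map (fun kv => if kv.2 = su then (kv.1, un) else kv))).getD k d
      = if (PySem.Dict.mk items).getD k d = su then un else (PySem.Dict.mk items).getD k d := by
  induction items with
  | nil => simp at hk
  | cons kv rest ih =>
    simp only [List.map_cons, List.mem_cons] at hk
    simp only [PySem.Dict.getD, PySem.Dict.get?] at ih ⊢
    simp only [List.map_cons]
    have hfst : (if kv.2 = su then (kv.1, un) else kv).1 = kv.1 := by split <;> rfl
    by_cases hbk : (kv.1 == k) = true
    · rw [List.find?_cons_of_pos (by rw [hfst]; exact hbk),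
         List.find?_cons_of_pos (p := fun p => p.1 == k) (a := kv) (l := rest) hbk]
      simp only [Option.map_some, Option.getD_some]
      split <;> rfl
    · have hbk' : (kv.1 == k) = false := by simpa using hbk
      have hnek : kv.1 ≠ k := by simpa using hbk
      rw [List.find?_cons_of_neg (by rw [hfst]; simp [hbk']),
         List.find?_cons_of_neg (p := fun p => p.1 == k) (a := kv) (l := rest) (by simp [hbk'])]
      have hk' : k ∈ rest.map Prod.fst := by
        rcases hk with h | h
        · exact absurd h.symm hnek
        · exact h
      exact ih hk'

theorem pv_keys_remap (items : List (PvJ × PySem.Set PvJ)) (su un : PySem.Set PvJ) :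
    (PySem.Dict.mk (items.map (fun kv => if kv.2 = su then (kv.1, un) else kv))).keys
      = (PySem.Dict.mk items).keys := by
  simp only [PySem.Dict.keys, List.map_map]
  apply List.map_congr_left
  intro kv _
  simp only [Function.comp_apply]
  split <;> rfl

theorem pv_getD_foldl_insert (l : List PvJ) (w : PySem.Set PvJ)
    (g : PySem.Dict PvJ (PySem.Set PvJ)) (k : PvJ) (d : PySem.Set PvJ) :
    ((l.foldl (fun h n => h.insert n w) g)).getD k d = if k ∈ l then w else g.getD k d := by
  induction l generalizing g with
  | nil => simp
  | cons n rest ih =>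
    simp only [List.foldl_cons]
    rw [ih]
    by_cases hr : k ∈ rest
    · simp [hr]
    · by_cases hkn : k = n
      · subst hkn; simp [hr]
      · simp [hr, hkn, PySem.Dict.getD_insert]

theorem pv_update_self_of_subset (s : PySem.Set PvJ) (xs : List PvJ) (h : ∀ x ∈ xs, x ∈ s) :
    PySem.Set.update s xs = s := by
  rw [PySem.Set.update_eq_append_filter]
  have hnil : (PySem.Set.ofList xs).filter (fun y => !(PySem.Set.contains s y)) = [] := by
    apply List.filter_eq_nil_iff.mpr
    intro y hy
    have hys : y ∈ s := h y ((PySem.Set.mem_ofList _ _).mp hy)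
    simpa using hys
  rw [hnil, List.append_nil]

theorem pv_keys_foldl_insert (l : List PvJ) (w : PySem.Set PvJ)
    (g : PySem.Dict PvJ (PySem.Set PvJ)) (h : ∀ n ∈ l, n ∈ g.keys) :
    (l.foldl (fun h n => h.insert n w) g).keys = g.keys := by
  rw [PySem.Dict.keys_foldl_insert (f := fun _ _ => w)]
  exact pv_update_self_of_subset _ _ h

theorem pvConnect_spec {K g cs} (inv : PvInv K g cs) {u v : PvJ} (hu : u ∈ K) (hv : v ∈ K)
    (hcase : v ∉ g.getD u PySem.Set.empty) :
    (pvConnect g u v).keys = K ∧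
    ∀ k ∈ K, (pvConnect g u v).getD k PySem.Set.empty =
      if k ∈ g.getD u PySem.Set.empty ∨ k ∈ g.getD v PySem.Set.empty
      then g.getD u PySem.Set.empty ++ g.getD v PySem.Set.empty
      else g.getD k PySem.Set.empty := by
  obtain ⟨hcu_mem, hu_mem⟩ := pvInv_getD_mem inv hu
  obtain ⟨hcv_mem, hv_mem⟩ := pvInv_getD_mem inv hv
  have hne : g.getD u PySem.Set.empty ≠ g.getD v PySem.Set.empty := fun h => hcase (h ▸ hv_mem)
  have hdisj : ∀ x ∈ g.getD v PySem.Set.empty, x ∉ g.getD u PySem.Set.empty :=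
    fun x hx hx' => hne (pv_disj_unique inv.disj hcu_mem hcv_mem hx' hx)
  have hcontains : PySem.Set.contains (g.getD u PySem.Set.empty) v = false := by
    rw [← Bool.not_eq_true]
    intro hcc
    exact hcase ((PySem.Set.contains_iff _ _).mp hcc)
  have hun : PySem.Set.union (g.getD u PySem.Set.empty) (g.getD v PySem.Set.empty)
      = g.getD u PySem.Set.empty ++ g.getD v PySem.Set.empty := by
    show PySem.Set.update _ _ = _
    exact PySem.Set.update_eq_append_of_disjoint _ _ (inv.cnd _ hcv_mem) hdisj
  have heta : PySem.Dict.mk g.items = g := rfl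
  have hiff : ∀ k ∈ K, (g.getD k PySem.Set.empty = g.getD u PySem.Set.empty ↔
      k ∈ g.getD u PySem.Set.empty) := by
    intro k hk
    constructor
    · intro h; exact h ▸ (pvInv_getD_mem inv hk).2
    · intro h; exact inv.val k hk _ hcu_mem h
  have hcond : ¬ (PySem.Set.contains (g.getD u PySem.Set.empty) v = true) := by
    rw [hcontains]; simp
  simp only [pvConnect]
  rw [if_neg hcond]
  constructor
  · rw [pv_keys_foldl_insert]
    · rw [pv_keys_remap, heta]; exact inv.keys_eq
    · intro n hn
      rw [pv_keys_remap, heta, inv.keys_eq]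
      exact inv.sub _ hcv_mem n hn
  · intro k hk
    rw [pv_getD_foldl_insert]
    have hkitems : k ∈ g.items.map Prod.fst := by
      have : g.items.map Prod.fst = g.keys := rfl
      rw [this, inv.keys_eq]; exact hk
    by_cases hkcv : k ∈ g.getD v PySem.Set.empty
    · rw [if_pos hkcv, if_pos (Or.inr hkcv), hun]
    · rw [if_neg hkcv, pv_getD_remap _ _ _ _ _ hkitems, heta]
      by_cases hkcu : k ∈ g.getD u PySem.Set.empty
      · rw [if_pos ((hiff k hk).mpr hkcu), if_pos (Or.inl hkcu), hun]
      · rw [if_neg (fun h => hkcu ((hiff k hk).mp h)), if_neg (by rintro (h | h); exact hkcu h; exact hkcv h)]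

theorem pvMerge_eq_same {K g cs} (inv : PvInv K g cs) {u v : PvJ} (hu : u ∈ K) (hv : v ∈ K)
    (hcase : v ∈ g.getD u PySem.Set.empty) : pvMerge cs u v = cs := by
  obtain ⟨hcu_mem, hu_mem⟩ := pvInv_getD_mem inv hu
  obtain ⟨hcv_mem, hv_mem⟩ := pvInv_getD_mem inv hv
  have hfind_u : cs.find? (fun c => decide (u ∈ c)) = some (g.getD u PySem.Set.empty) :=
    pv_find?_unique hcu_mem (decide_eq_true hu_mem)
      (fun d hd hpd => pv_disj_unique inv.disj hd hcu_mem (of_decide_eq_true hpd) hu_mem)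
  have hfind_v : cs.find? (fun c => decide (v ∈ c)) = some (g.getD v PySem.Set.empty) :=
    pv_find?_unique hcv_mem (decide_eq_true hv_mem)
      (fun d hd hpd => pv_disj_unique inv.disj hd hcv_mem (of_decide_eq_true hpd) hv_mem)
  have heq : g.getD u PySem.Set.empty = g.getD v PySem.Set.empty :=
    pv_disj_unique inv.disj hcu_mem hcv_mem hcase hv_mem
  simp only [pvMerge, hfind_u, hfind_v, Option.getD_some]
  rw [if_pos heq]

theorem pvMerge_eq {K g cs} (inv : PvInv K g cs) {u v : PvJ} (hu : u ∈ K) (hv : v ∈ K)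
    (hcase : v ∉ g.getD u PySem.Set.empty) :
    pvMerge cs u v = ((cs.erase (g.getD u PySem.Set.empty)).erase (g.getD v PySem.Set.empty))
      ++ [g.getD u PySem.Set.empty ++ g.getD v PySem.Set.empty] := by
  obtain ⟨hcu_mem, hu_mem⟩ := pvInv_getD_mem inv hu
  obtain ⟨hcv_mem, hv_mem⟩ := pvInv_getD_mem inv hv
  have hfind_u : cs.find? (fun c => decide (u ∈ c)) = some (g.getD u PySem.Set.empty) :=
    pv_find?_unique hcu_mem (decide_eq_true hu_mem)
      (fun d hd hpd => pv_disj_unique inv.disj hd hcu_mem (of_decide_eq_true hpd) hu_mem)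
  have hfind_v : cs.find? (fun c => decide (v ∈ c)) = some (g.getD v PySem.Set.empty) :=
    pv_find?_unique hcv_mem (decide_eq_true hv_mem)
      (fun d hd hpd => pv_disj_unique inv.disj hd hcv_mem (of_decide_eq_true hpd) hv_mem)
  have hne : g.getD u PySem.Set.empty ≠ g.getD v PySem.Set.empty := fun h => hcase (h ▸ hv_mem)
  have hdisj : ∀ x ∈ g.getD v PySem.Set.empty, x ∉ g.getD u PySem.Set.empty :=
    fun x hx hx' => hne (pv_disj_unique inv.disj hcu_mem hcv_mem hx' hx)
  have hfilter : (g.getD v PySem.Set.empty).filter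
      (fun x => decide (x ∉ g.getD u PySem.Set.empty)) = g.getD v PySem.Set.empty :=
    List.filter_eq_self.mpr (fun x hx => decide_eq_true (hdisj x hx))
  simp only [pvMerge, hfind_u, hfind_v, Option.getD_some]
  rw [if_neg hne, hfilter]

theorem pvInv_step {K g cs} (inv : PvInv K g cs) {u v : PvJ} (hu : u ∈ K) (hv : v ∈ K) :
    PvInv K (pvConnect g u v) (pvMerge cs u v) := by
  by_cases hvc : v ∈ g.getD u PySem.Set.empty
  · have hA : pvConnect g u v = g := by
      have hcc : PySem.Set.contains (g.getD u PySem.Set.empty) v = true :=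
        (PySem.Set.contains_iff _ _).mpr hvc
      simp only [pvConnect]
      rw [if_pos hcc]
    rw [hA, pvMerge_eq_same inv hu hv hvc]
    exact inv
  · obtain ⟨hkeys, hgetD⟩ := pvConnect_spec inv hu hv hvc
    rw [pvMerge_eq inv hu hv hvc]
    obtain ⟨hcu_mem, hu_mem⟩ := pvInv_getD_mem inv hu
    obtain ⟨hcv_mem, hv_mem⟩ := pvInv_getD_mem inv hv
    have hne : g.getD u PySem.Set.empty ≠ g.getD v PySem.Set.empty := fun h => hvc (h ▸ hv_mem)
    have hnd : cs.Nodup := pv_cs_nodup inv.ne inv.disj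
    have hmem' : ∀ c, c ∈ ((cs.erase (g.getD u PySem.Set.empty)).erase (g.getD v PySem.Set.empty))
        ++ [g.getD u PySem.Set.empty ++ g.getD v PySem.Set.empty] ↔
        c = g.getD u PySem.Set.empty ++ g.getD v PySem.Set.empty ∨
        (c ∈ cs ∧ c ≠ g.getD u PySem.Set.empty ∧ c ≠ g.getD v PySem.Set.empty) := by
      intro c
      rw [List.mem_append, List.mem_singleton, (hnd.erase _).mem_erase_iff, hnd.mem_erase_iff]
      tauto
    refine ⟨hkeys, inv.knd, ?_, ?_, ?_, ?_, ?_, ?_⟩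
    · intro k hk
      obtain ⟨c, hc, hkc⟩ := inv.cover k hk
      by_cases h1 : c = g.getD u PySem.Set.empty
      · exact ⟨_, (hmem' _).mpr (Or.inl rfl), List.mem_append_left _ (h1 ▸ hkc)⟩
      by_cases h2 : c = g.getD v PySem.Set.empty
      · exact ⟨_, (hmem' _).mpr (Or.inl rfl), List.mem_append_right _ (h2 ▸ hkc)⟩
      · exact ⟨c, (hmem' _).mpr (Or.inr ⟨hc, h1, h2⟩), hkc⟩
    · intro c hc x hx
      rcases (hmem' c).mp hc with rfl | ⟨hc', _, _⟩
      · rcases List.mem_append.mp hx with h | h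
        · exact inv.sub _ hcu_mem _ h
        · exact inv.sub _ hcv_mem _ h
      · exact inv.sub _ hc' _ hx
    · intro c hc
      rcases (hmem' c).mp hc with rfl | ⟨hc', _, _⟩
      · intro habs
        rw [List.append_eq_nil_iff] at habs
        rw [habs.1] at hu_mem
        cases hu_mem
      · exact inv.ne _ hc'
    · intro c hc
      rcases (hmem' c).mp hc with rfl | ⟨hc', _, _⟩
      · exact (inv.cnd _ hcu_mem).append (inv.cnd _ hcv_mem)
          (fun x hx hx' => hne (pv_disj_unique inv.disj hcu_mem hcv_mem hx hx'))
      · exact inv.cnd _ hc'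
    · apply List.pairwise_append.mpr
      refine ⟨inv.disj.sublist ((List.erase_sublist).trans (List.erase_sublist)), List.pairwise_singleton _ _, ?_⟩
      intro a ha b hb
      rw [List.mem_singleton] at hb
      subst hb
      have hainfo : a ≠ g.getD v PySem.Set.empty ∧ a ≠ g.getD u PySem.Set.empty ∧ a ∈ cs := by
        have h1 := (hnd.erase _).mem_erase_iff.mp ha
        have h2 := hnd.mem_erase_iff.mp h1.2
        exact ⟨h1.1, h2.1, h2.2⟩
      intro x hxa hx
      rcases List.mem_append.mp hx with h | h
      · exact hainfo.2.1 (pv_disj_unique inv.disj hainfo.2.2 hcu_mem hxa h)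
      · exact hainfo.1 (pv_disj_unique inv.disj hainfo.2.2 hcv_mem hxa h)
    · intro k hk c hc hkc
      rw [hgetD k hk]
      rcases (hmem' c).mp hc with rfl | ⟨hc', hne1, hne2⟩
      · rw [if_pos (List.mem_append.mp hkc)]
      · rw [if_neg, inv.val k hk c hc' hkc]
        rintro (h | h)
        · exact hne1 (pv_disj_unique inv.disj hc' hcu_mem hkc h)
        · exact hne2 (pv_disj_unique inv.disj hc' hcv_mem hkc h)

theorem pvInv_foldl {K : List PvJ} (es : List (PvJ × PvJ)) {g cs} (inv : PvInv K g cs)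
    (hes : ∀ e ∈ es, e.1 ∈ K ∧ e.2 ∈ K) :
    PvInv K (es.foldl (fun g e => pvConnect g e.1 e.2) g)
      (es.foldl (fun cs e => pvMerge cs e.1 e.2) cs) := by
  induction es generalizing g cs with
  | nil => exact inv
  | cons e rest ih =>
    simp only [List.foldl_cons]
    exact ih (pvInv_step inv (hes e List.mem_cons_self).1 (hes e List.mem_cons_self).2)
      (fun e' he' => hes e' (List.mem_cons_of_mem _ he'))

theorem pvCircuits_fold {K g cs} (inv : PvInv K g cs) (r : List PvJ) (hr : ∀ k ∈ r, k ∈ K)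
    (out : List (PySem.Set PvJ)) (seen : PySem.Set PvJ)
    (h1 : ∀ c ∈ out, c ∈ cs) (h2 : out.Nodup) (h3 : ∀ x, x ∈ seen ↔ ∃ c ∈ out, x ∈ c) :
    (∀ c ∈ (r.foldl
      (fun (acc : List (PySem.Set PvJ) × PySem.Set PvJ) k =>
        if PySem.Set.contains acc.2 k then acc
        else (acc.1 ++ [g.getD k PySem.Set.empty], PySem.Set.update acc.2 (g.getD k PySem.Set.empty)))
      (out, seen)).1, c ∈ cs) ∧
    (r.foldl
      (fun (acc : List (PySem.Set PvJ) × PySem.Set PvJ) k =>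
        if PySem.Set.contains acc.2 k then acc
        else (acc.1 ++ [g.getD k PySem.Set.empty], PySem.Set.update acc.2 (g.getD k PySem.Set.empty)))
      (out, seen)).1.Nodup ∧
    (∀ c ∈ out, c ∈ (r.foldl
      (fun (acc : List (PySem.Set PvJ) × PySem.Set PvJ) k =>
        if PySem.Set.contains acc.2 k then acc
        else (acc.1 ++ [g.getD k PySem.Set.empty], PySem.Set.update acc.2 (g.getD k PySem.Set.empty)))
      (out, seen)).1) ∧
    (∀ k ∈ r, ∀ c ∈ cs, k ∈ c → c ∈ (r.foldl
      (fun (acc : List (PySem.Set PvJ) × PySem.Set PvJ) k =>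
        if PySem.Set.contains acc.2 k then acc
        else (acc.1 ++ [g.getD k PySem.Set.empty], PySem.Set.update acc.2 (g.getD k PySem.Set.empty)))
      (out, seen)).1) := by
  induction r generalizing out seen with
  | nil =>
    refine ⟨h1, h2, fun c hc => hc, ?_⟩
    intro k hk
    cases hk
  | cons k0 r ih =>
    simp only [List.foldl_cons]
    by_cases hsk : PySem.Set.contains seen k0 = true
    · simp only [hsk, if_true]
      obtain ⟨res1, res2, res3, res4⟩ := ih (fun k hk => hr k (List.mem_cons_of_mem _ hk)) out seen h1 h2 h3
      refine ⟨res1, res2, res3, ?_⟩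
      intro k hk c hc hkc
      rcases List.mem_cons.mp hk with rfl | hk'
      · obtain ⟨c0, hc0_out, hkc0⟩ := (h3 k).mp ((PySem.Set.contains_iff _ _).mp hsk)
        have : c = c0 := pv_disj_unique inv.disj hc (h1 _ hc0_out) hkc hkc0
        rw [this]
        exact res3 _ hc0_out
      · exact res4 k hk' c hc hkc
    · simp only [hsk, Bool.false_eq_true, if_false]
      have hk0K : k0 ∈ K := hr k0 List.mem_cons_self
      obtain ⟨hck_cs, hk0ck⟩ := pvInv_getD_mem inv hk0K
      have hck_not_out : g.getD k0 PySem.Set.empty ∉ out := by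
        intro hmem
        exact hsk ((PySem.Set.contains_iff _ _).mpr ((h3 k0).mpr ⟨_, hmem, hk0ck⟩))
      have h1' : ∀ c ∈ out ++ [g.getD k0 PySem.Set.empty], c ∈ cs := by
        intro c hc
        rcases List.mem_append.mp hc with h | h
        · exact h1 c h
        · rw [List.mem_singleton] at h; exact h ▸ hck_cs
      have h2' : (out ++ [g.getD k0 PySem.Set.empty]).Nodup := by
        refine h2.append (List.nodup_singleton _) ?_
        intro a ha hb
        rw [List.mem_singleton] at hb
        exact hck_not_out (hb ▸ ha)
      have h3' : ∀ x, x ∈ PySem.Set.update seen (g.getD k0 PySem.Set.empty) ↔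
          ∃ c ∈ out ++ [g.getD k0 PySem.Set.empty], x ∈ c := by
        intro x
        rw [PySem.Set.mem_update]
        constructor
        · rintro (h | h)
          · obtain ⟨c, hc, hxc⟩ := (h3 x).mp h
            exact ⟨c, List.mem_append_left _ hc, hxc⟩
          · exact ⟨_, List.mem_append_right _ (List.mem_singleton.mpr rfl), h⟩
        · rintro ⟨c, hc, hxc⟩
          rcases List.mem_append.mp hc with h | h
          · exact Or.inl ((h3 x).mpr ⟨c, h, hxc⟩)
          · rw [List.mem_singleton] at h
            exact Or.inr (h ▸ hxc)
      obtain ⟨res1, res2, res3, res4⟩ := ih (fun k hk => hr k (List.mem_cons_of_mem _ hk))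
        (out ++ [g.getD k0 PySem.Set.empty]) (PySem.Set.update seen (g.getD k0 PySem.Set.empty)) h1' h2' h3'
      refine ⟨res1, res2, fun c hc => res3 c (List.mem_append_left _ hc), ?_⟩
      intro k hk c hc hkc
      rcases List.mem_cons.mp hk with rfl | hk'
      · have : c = g.getD k PySem.Set.empty := pv_disj_unique inv.disj hc hck_cs hkc hk0ck
        rw [this]
        exact res3 _ (List.mem_append_right _ (List.mem_singleton.mpr rfl))
      · exact res4 k hk' c hc hkc

theorem pvCircuits_perm {K g cs} (inv : PvInv K g cs) : (pvGetCircuits g).Perm cs := by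
  have hnd_cs : cs.Nodup := pv_cs_nodup inv.ne inv.disj
  obtain ⟨res1, res2, _, res4⟩ := pvCircuits_fold inv K (fun k hk => hk) [] PySem.Set.empty
    (by intro c hc; cases hc) List.nodup_nil
    (by intro x; simp [PySem.Set.empty])
  unfold pvGetCircuits
  rw [inv.keys_eq]
  rw [List.perm_ext_iff_of_nodup res2 hnd_cs]
  intro a
  constructor
  · exact fun ha => res1 a ha
  · intro ha
    obtain ⟨x, hx⟩ := List.exists_mem_of_ne_nil a (inv.ne a ha)
    exact res4 x (inv.sub a ha x hx) a ha hx

theorem pvConnected_iff {K g cs} (inv : PvInv K g cs) (hK : K ≠ []) :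
    pvIsConnected g = decide (cs.length = 1) := by
  have hnd : g.keys.Nodup := by rw [inv.keys_eq]; exact inv.knd
  have hvals : g.values = K.map (fun k => g.getD k PySem.Set.empty) := by
    rw [PySem.Dict.values_eq_map_keys g hnd PySem.Set.empty, inv.keys_eq]
  obtain ⟨k0, K', hKeq⟩ := List.exists_cons_of_ne_nil hK
  have hk0 : k0 ∈ K := by rw [hKeq]; exact List.mem_cons_self
  obtain ⟨hc0_mem, hk0c0⟩ := pvInv_getD_mem inv hk0
  have hsize : g.size = K.length := by
    have hkl : g.keys.length = g.items.length := by simp [PySem.Dict.keys]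
    rw [inv.keys_eq] at hkl
    exact hkl.symm
  have hflat_nd : cs.flatten.Nodup := by
    rw [List.nodup_flatten]
    exact ⟨fun c hc => inv.cnd c hc, inv.disj.imp (fun h => fun x hx hx' => h x hx hx')⟩
  have hflat_mem : ∀ x, x ∈ cs.flatten ↔ x ∈ K := by
    intro x
    rw [List.mem_flatten]
    constructor
    · rintro ⟨c, hc, hxc⟩; exact inv.sub c hc x hxc
    · intro hx
      obtain ⟨c, hc, hxc⟩ := inv.cover x hx
      exact ⟨c, hc, hxc⟩
  have hperm : cs.flatten.Perm K := (List.perm_ext_iff_of_nodup hflat_nd inv.knd).mpr hflat_mem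
  have hsum : (cs.map List.length).sum = K.length := by
    rw [← List.length_flatten]
    exact hperm.length_eq
  have hiff : (g.getD k0 PySem.Set.empty).length = K.length ↔ cs.length = 1 := by
    constructor
    · intro hc0len
      have hperm2 : cs.Perm (g.getD k0 PySem.Set.empty :: cs.erase (g.getD k0 PySem.Set.empty)) :=
        List.perm_cons_erase hc0_mem
      have hsum2 : (cs.map List.length).sum = (g.getD k0 PySem.Set.empty).length
          + ((cs.erase (g.getD k0 PySem.Set.empty)).map List.length).sum := by
        rw [(hperm2.map List.length).sum_eq]
        simp
      have hzero : ((cs.erase (g.getD k0 PySem.Set.empty)).map List.length).sum = 0 := by omega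
      have hnil : cs.erase (g.getD k0 PySem.Set.empty) = [] := by
        by_contra hne2
        obtain ⟨d, hd⟩ := List.exists_mem_of_ne_nil _ hne2
        have hd_cs : d ∈ cs := List.mem_of_mem_erase hd
        have hdne : d.length ≠ 0 := by
          intro h0
          exact inv.ne d hd_cs (List.length_eq_zero_iff.mp h0)
        have hmem2 : d.length ∈ (cs.erase (g.getD k0 PySem.Set.empty)).map List.length :=
          List.mem_map_of_mem hd
        exact hdne (List.sum_eq_zero_iff.mp hzero _ hmem2)
      rw [hperm2.length_eq, hnil]
      rfl
    · intro h1
      obtain ⟨c, hceq⟩ := List.length_eq_one_iff.mp h1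
      have hcc : g.getD k0 PySem.Set.empty = c := by
        rw [hceq] at hc0_mem
        simpa using hc0_mem
      rw [← hsum, hceq, ← hcc]
      simp
  unfold pvIsConnected
  rw [hvals, hKeq, List.map_cons]
  show (PySem.Set.len (g.getD k0 PySem.Set.empty) == (g.size : Int)) = decide (cs.length = 1)
  rw [hsize]
  by_cases h : cs.length = 1
  · have hlen := hiff.mpr h
    simp only [PySem.Set.len, h, decide_true, beq_iff_eq]
    exact_mod_cast hlen
  · have hne3 : (g.getD k0 PySem.Set.empty).length ≠ K.length := fun hc => h (hiff.mp hc)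
    simp only [PySem.Set.len, h, decide_false]
    rw [beq_eq_false_iff_ne]
    intro hc
    exact hne3 (by exact_mod_cast hc)

theorem pvLoop_eq {K : List PvJ} (es : List (PvJ × PvJ)) {g cs} (inv : PvInv K g cs)
    (hes : ∀ e ∈ es, e.1 ∈ K ∧ e.2 ∈ K) : pvLoopA es g = pvLoopB es cs := by
  induction es generalizing g cs with
  | nil => rfl
  | cons e rest ih =>
    have hu := (hes e List.mem_cons_self).1
    have hv := (hes e List.mem_cons_self).2
    have inv' := pvInv_step inv hu hv
    have hK : K ≠ [] := by
      intro h
      rw [h] at hu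
      cases hu
    simp only [pvLoopA, pvLoopB]
    rw [pvConnected_iff inv' hK]
    by_cases h1 : (pvMerge cs e.1 e.2).length = 1
    · simp [h1]
    · simp only [h1, decide_false, Bool.false_eq_true, if_false]
      exact ih inv' (fun e' he' => hes e' (List.mem_cons_of_mem _ he'))

theorem pv_getD_mk_map_pair (S : List PvJ) (k : PvJ) (d : PySem.Set PvJ) :
    (PySem.Dict.mk (S.map (fun p => (p, ([p] : PySem.Set PvJ))))).getD k d
      = if k ∈ S then [k] else d :=
  pv_getD_mk_map S (fun p => [p]) k d

theorem pvInitA (l : List PvJ) (S : PySem.Set PvJ) :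
    l.foldl pvAddJunction (PySem.Dict.mk (S.map (fun p => (p, ([p] : PySem.Set PvJ)))))
      = PySem.Dict.mk ((PySem.Set.update S l).map (fun p => (p, ([p] : PySem.Set PvJ)))) := by
  induction l generalizing S with
  | nil => rw [List.foldl_nil, PySem.Set.update_nil]
  | cons p l ih =>
    rw [List.foldl_cons, PySem.Set.update_cons]
    have hkeys : (PySem.Dict.mk (S.map (fun p => (p, ([p] : PySem.Set PvJ))))).keys = S := by
      simp [PySem.Dict.keys, List.map_map, Function.comp_def]
    have hstep : pvAddJunction (PySem.Dict.mk (S.map (fun p => (p, ([p] : PySem.Set PvJ))))) p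
        = PySem.Dict.mk ((PySem.Set.add S p).map (fun p => (p, ([p] : PySem.Set PvJ)))) := by
      unfold pvAddJunction
      rw [pv_getD_mk_map_pair]
      by_cases hp : p ∈ S
      · rw [if_pos hp, PySem.Set.add_of_mem hp]
        have hadd : PySem.Set.add ([p] : PySem.Set PvJ) p = [p] :=
          PySem.Set.add_of_mem (List.mem_singleton.mpr rfl)
        rw [hadd]
        have hcont : (PySem.Dict.mk (S.map (fun p => (p, ([p] : PySem.Set PvJ))))).contains p = true := by
          rw [PySem.Dict.contains_iff_mem_keys, hkeys]
          exact hp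
        simp only [PySem.Dict.insert, hcont, if_true]
        congr 1
        rw [List.map_map]
        apply List.map_congr_left
        intro q _
        simp only [Function.comp_apply]
        by_cases hq : (q == p) = true
        · have : q = p := by simpa using hq
          subst this
          simp
        · have hq' : (q == p) = false := by simpa using hq
          simp [hq']
      · rw [if_neg hp, PySem.Set.add_of_not_mem hp]
        have hadd : PySem.Set.add PySem.Set.empty p = [p] := rfl
        rw [hadd]
        have hcont : (PySem.Dict.mk (S.map (fun p => (p, ([p] : PySem.Set PvJ))))).contains p = false := by
          rw [← Bool.not_eq_true, PySem.Dict.contains_iff_mem_keys, hkeys]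
          exact hp
        simp only [PySem.Dict.insert, hcont, Bool.false_eq_true, if_false]
        rw [List.map_append]
        rfl
    rw [hstep]
    exact ih (PySem.Set.add S p)

theorem pvInitB (l : List PvJ) (S : PySem.Set PvJ) :
    l.foldl (fun (cs : List (List PvJ)) p =>
        if cs.any (fun c => decide (p ∈ c)) then cs else cs ++ [[p]]) (S.map (fun p => [p]))
      = (PySem.Set.update S l).map (fun p => [p]) := by
  induction l generalizing S with
  | nil => rw [List.foldl_nil, PySem.Set.update_nil]
  | cons p l ih =>
    rw [List.foldl_cons, PySem.Set.update_cons]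
    have hany : (S.map (fun p => [p])).any (fun c => decide (p ∈ c)) = decide (p ∈ S) := by
      rw [List.any_map]
      induction S with
      | nil => simp
      | cons q S ihS =>
        simp only [List.any_cons, ihS, Function.comp_apply]
        by_cases hpq : p = q
        · subst hpq; simp
        · simp [hpq, List.mem_cons]
    by_cases hp : p ∈ S
    · rw [hany]
      simp only [hp, decide_true, if_true]
      rw [PySem.Set.add_of_mem hp]
      exact ih S
    · rw [hany]
      simp only [hp, decide_false, Bool.false_eq_true, if_false]
      rw [PySem.Set.add_of_not_mem hp]
      have hmapapp : (S.map (fun p => ([p] : List PvJ))) ++ [[p]] = (S ++ [p]).map (fun p => [p]) := by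
        rw [List.map_append]
        rfl
      rw [hmapapp]
      exact ih (S ++ [p])

theorem pvInv_init (data : List PvJ) :
    PvInv (PySem.Set.ofList data) (data.foldl pvAddJunction PySem.Dict.empty)
      (data.foldl (fun (cs : List (List PvJ)) p =>
        if cs.any (fun c => decide (p ∈ c)) then cs else cs ++ [[p]]) []) := by
  have hA := pvInitA data []
  have hB := pvInitB data []
  simp only [List.map_nil] at hA hB
  rw [PySem.Set.update_nil_left] at hA hB
  have hempty : PySem.Dict.empty = PySem.Dict.mk ([] : List (PvJ × PySem.Set PvJ)) := rfl
  rw [hempty, hA, hB]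
  have hknd : (PySem.Set.ofList data).Nodup := PySem.Set.nodup_ofList data
  refine ⟨?_, hknd, ?_, ?_, ?_, ?_, ?_, ?_⟩
  · simp [PySem.Dict.keys, List.map_map, Function.comp_def]
  · intro k hk
    exact ⟨[k], List.mem_map_of_mem hk, List.mem_singleton.mpr rfl⟩
  · intro c hc x hx
    obtain ⟨p, hp, rfl⟩ := List.mem_map.mp hc
    rw [List.mem_singleton] at hx
    exact hx ▸ hp
  · intro c hc
    obtain ⟨p, _, rfl⟩ := List.mem_map.mp hc
    simp
  · intro c hc
    obtain ⟨p, _, rfl⟩ := List.mem_map.mp hc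
    exact List.nodup_singleton _
  · rw [List.pairwise_map]
    refine List.Pairwise.imp ?_ hknd
    intro p q hpq x hxp hxq
    rw [List.mem_singleton] at hxp hxq
    exact hpq (hxp ▸ hxq ▸ rfl)
  · intro k hk c hc hkc
    obtain ⟨p, hp, rfl⟩ := List.mem_map.mp hc
    rw [List.mem_singleton] at hkc
    subst hkc
    rw [pv_getD_mk_map_pair]
    rw [if_pos hp]

-- ===== VERDICT (by name: the statement is the Claim_ definition above) =====
theorem solve_spec : Claim_equal_solve := by
  unfold Claim_equal_solve
  intro data _hdom
  unfold Spec_solve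
  have hEmem : ∀ e ∈ PySem.List.sorted (pvPairs data) pvDist, e.1 ∈ PySem.Set.ofList data ∧ e.2 ∈ PySem.Set.ofList data := by
    intro e he
    rw [PySem.List.mem_sorted] at he
    obtain ⟨h1, h2⟩ := pvPairs_mem he
    exact ⟨(PySem.Set.mem_ofList _ _).mpr h1, (PySem.Set.mem_ofList _ _).mpr h2⟩
  have inv0 := pvInv_init data
  have inv1 := pvInv_foldl (PySem.List.slice (PySem.List.sorted (pvPairs data) pvDist) none (some 1000)) inv0
      (fun e he => hEmem e (PySem.List.mem_of_mem_slice _ _ _ he))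
  have hperm := (pvCircuits_perm inv1).map PySem.Set.len
  have hsorted := PySem.List.sorted_eq_sorted_of_perm _ _ (fun (x : Int) => x) (fun a b h => h) hperm
  have hloop := pvLoop_eq (PySem.List.slice (PySem.List.sorted (pvPairs data) pvDist) (some 1000) none) inv1
      (fun e he => hEmem e (PySem.List.mem_of_mem_slice _ _ _ he))
  show ((PySem.List.slice (PySem.List.sorted ((pvGetCircuits ((PySem.List.slice (PySem.List.sorted (pvPairs data) pvDist) none (some 1000)).foldl
          (fun g e => pvConnect g e.1 e.2) (data.foldl pvAddJunction PySem.Dict.empty))).map PySem.Set.len) (fun x => x)) (some (-3)) none).prod,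
        pvLoopA (PySem.List.slice (PySem.List.sorted (pvPairs data) pvDist) (some 1000) none)
          ((PySem.List.slice (PySem.List.sorted (pvPairs data) pvDist) none (some 1000)).foldl
          (fun g e => pvConnect g e.1 e.2) (data.foldl pvAddJunction PySem.Dict.empty)))
     = ((PySem.List.slice (PySem.List.sorted (((PySem.List.slice (PySem.List.sorted (pvPairs data) pvDist) none (some 1000)).foldl
          (fun cs e => pvMerge cs e.1 e.2) (data.foldl (fun (cs : List (List PvJ)) p =>
            if cs.any (fun c => decide (p ∈ c)) then cs else cs ++ [[p]]) [])).map PySem.Set.len) (fun x => x)) (some (-3)) none).foldl (· * ·) 1,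
        pvLoopB (PySem.List.slice (PySem.List.sorted (pvPairs data) pvDist) (some 1000) none)
          ((PySem.List.slice (PySem.List.sorted (pvPairs data) pvDist) none (some 1000)).foldl
          (fun cs e => pvMerge cs e.1 e.2) (data.foldl (fun (cs : List (List PvJ)) p =>
            if cs.any (fun c => decide (p ∈ c)) then cs else cs ++ [[p]]) [])))
  rw [hsorted, hloop, List.prod_eq_foldl]
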